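-- pv_equiv track=rewrite | github.com/pioner22/client-cli | modules/text_editor.py | caret_view_window
-- ===== SOURCE A (Python) =====
-- from typing import List, Tuple, Optional
--
-- def wrap_text_simple(text: str, width: int) -> List[str]:
--     """Simple greedy word-wrap used by the TUI.
--
--     - Breaks lines at spaces where possible within `width`.
--     - Falls back to hard cut if no space found.
--     - Preserves explicit newlines by processing line-by-line.
--     """
--     if width <= 0:
--         return [text]
--     lines: List[str] = []
--     for raw_line in text.splitlines() or [""]:
--         s = raw_line
--         while len(s) > width:
--             cut = s.rfind(' ', 0, width)
--             if cut == -1: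
--                 cut = width
--             lines.append(s[:cut])
--             s = s[cut:].lstrip()
--         lines.append(s)
--     return lines
--
-- def caret_view_window(text: str, caret: int, width: int, visible_rows: int) -> Tuple[int, int, int]:
--     """Compute a scrolling window for the input box that keeps caret visible.
--
--     Returns (start_row, caret_row_in_box, col_in_line).
--     - `start_row` is the first wrapped row to display.
--     - `caret_row_in_box` is zero-based row index within the visible window.
--     - `col_in_line` is caret column within the current wrapped line (logical col modulo width).
--     """
--     width = max(1, int(width))
--     visible_rows = max(1, int(visible_rows))
--     text = text or ""
--     caret = max(0, min(len(text), int(caret)))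
--
--     def _rows_for(t: str) -> int:
--         rows = 0
--         for raw in t.split('\n') or [""]:
--             chunks = wrap_text_simple(raw, width)
--             rows += max(1, len(chunks))
--         return rows
--
--     pre = text[:caret]
--     pre_rows = 0
--     for raw in pre.split('\n')[:-1]:
--         pre_rows += max(1, len(wrap_text_simple(raw, width)))
--     cur_line = pre.split('\n')[-1] if pre else ""
--     cur_row_offset = len(wrap_text_simple(cur_line, width)) - 1 if cur_line else 0
--     total_rows = _rows_for(text)
--     display_row = pre_rows + cur_row_offset
--     start_row = min(max(0, display_row - visible_rows + 1), max(0, total_rows - visible_rows))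
--     caret_row_in_box = max(0, min(visible_rows - 1, display_row - start_row))
--     col_in_line = len(cur_line) % width
--     return start_row, caret_row_in_box, col_in_line
-- ===== SOURCE B (Python) =====
-- from typing import List, Tuple
--
-- def wrap_text_simple(text: str, width: int) -> List[str]:
--     if width <= 0:
--         return [text]
--     lines: List[str] = []
--     for raw_line in text.splitlines() or [""]:
--         s = raw_line
--         while len(s) > width:
--             cut = s.rfind(' ', 0, width)
--             if cut == -1:
--                 cut = width
--             lines.append(s[:cut])
--             s = s[cut:].lstrip()
--         lines.append(s)
--     return lines
--
-- def caret_view_window(text: str, caret: int, width: int, visible_rows: int) -> Tuple[int, int, int]: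
--     width = max(1, int(width))
--     visible_rows = max(1, int(visible_rows))
--     text = text or ""
--     caret = max(0, min(len(text), int(caret)))
--
--     # One pass over the logical lines with a running character offset:
--     # the line containing the caret is located during the same pass that
--     # counts the total wrapped rows; no slicing/re-splitting of text[:caret].
--     total_rows = 0
--     display_row = 0
--     col_in_line = 0
--     offset = 0
--     for line in text.split('\n'):
--         end = offset + len(line)
--         if offset <= caret <= end:
--             prefix = line[:caret - offset]
--             display_row = total_rows + len(wrap_text_simple(prefix, width)) - 1
--             col_in_line = len(prefix) % width
--         total_rows += max(1, len(wrap_text_simple(line, width)))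
--         offset = end + 1
--
--     start_row = min(max(0, display_row - visible_rows + 1), max(0, total_rows - visible_rows))
--     caret_row_in_box = max(0, min(visible_rows - 1, display_row - start_row))
--     return start_row, caret_row_in_box, col_in_line
-- ===== Notes on version B (the rewrite author's own statement) =====
-- stated objective: alternative
-- what changed: B replaces A's prefix-slice-and-recount strategy (slice text[:caret], re-split it, count rows of its lines in three fragments, then separately recount the whole text) by a single forward pass over the logical lines of the full text with a running character offset that locates the caret's line during the same sweep that accumulates the total row count, so text[:caret] is never materialised and each full line is wrapped once instead of twice.
import Mathlib
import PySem

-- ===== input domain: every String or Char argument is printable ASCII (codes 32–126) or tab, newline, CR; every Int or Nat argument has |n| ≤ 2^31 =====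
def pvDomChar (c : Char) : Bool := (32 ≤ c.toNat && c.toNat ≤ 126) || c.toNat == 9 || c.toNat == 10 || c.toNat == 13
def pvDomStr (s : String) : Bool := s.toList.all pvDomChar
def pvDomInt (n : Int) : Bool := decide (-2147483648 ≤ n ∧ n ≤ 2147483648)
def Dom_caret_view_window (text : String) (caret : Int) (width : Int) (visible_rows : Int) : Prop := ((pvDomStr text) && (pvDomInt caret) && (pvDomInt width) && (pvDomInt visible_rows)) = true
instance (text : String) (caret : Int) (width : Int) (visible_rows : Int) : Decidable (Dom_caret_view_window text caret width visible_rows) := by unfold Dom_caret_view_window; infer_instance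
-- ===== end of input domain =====

-- B makes ONE forward pass over the logical lines of the full text with a running character
-- offset, locating the caret's line during the same sweep that counts the total rows,
-- instead of A's slice-text[:caret]-and-recount in three fragments; objective: alternative.

-- ===== PORT A =====
-- `wrap_text_simple`'s while-loop, ported with a structural fuel counter: each pass of the
-- Python loop drops at least one character of `s` (the space found before `width` is
-- lstripped away, or `width ≥ 1` characters are cut), so `fuel = s.length` makes the
-- fuel-0 branch unreachable and the loop body is executed exactly as in Python.
-- Shared by both Pythons verbatim, hence by both ports.
def wrapLoop (width : Nat) : Nat → List Char → List (List Char) → List (List Char)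
  | 0, s, acc => acc ++ [s]
  | fuel + 1, s, acc =>
    if (width : Int) < (s.length : Int) then
      -- cut = s.rfind(' ', 0, width); if cut == -1: cut = width
      let cut : Int := if PySem.Chars.rfindFrom s [' '] 0 (some (width : Int)) = -1 then (width : Int)
                       else PySem.Chars.rfindFrom s [' '] 0 (some (width : Int))
      -- lines.append(s[:cut]); s = s[cut:].lstrip()
      wrapLoop width fuel (PySem.Chars.lstrip (PySem.Chars.slice s (some cut) none))
        (acc ++ [PySem.Chars.slice s none (some cut)])
    else acc ++ [s]

def wrapTextSimple (text : List Char) (width : Int) : List (List Char) :=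
  if width ≤ 0 then [text]
  else
    -- for raw_line in text.splitlines() or [""]
    (if PySem.Chars.splitlines text = [] then [[]] else PySem.Chars.splitlines text).foldl
      (fun lines raw => wrapLoop width.toNat raw.length raw lines) []

def caret_view_window (text : String) (caret : Int) (width : Int) (visible_rows : Int) :
    Int × Int × Int :=
  let width := max 1 width
  let visible_rows := max 1 visible_rows
  let t := text.toList                      -- `text or ""` is the identity on strings
  let caret := max 0 (min (t.length : Int) caret)
  let pre := PySem.Chars.slice t none (some caret)
  -- pre.split('\n'): the separator is nonempty, so Python's split is PySem's splitOn
  let preSplit := PySem.Chars.splitOn pre ['\n']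
  let pre_rows := preSplit.dropLast.foldl
    (fun r raw => r + max 1 ((wrapTextSimple raw width).length : Int)) 0
  -- pre.split('\n')[-1] if pre else "" (the getD default is unreachable: split is never empty)
  let cur_line := if pre = [] then [] else (PySem.List.pyGet? preSplit (-1)).getD []
  let cur_row_offset : Int := if cur_line = [] then 0
                              else ((wrapTextSimple cur_line width).length : Int) - 1
  -- _rows_for(text): the `or [""]` is dead code (split('\n') is never empty)
  let total_rows := (PySem.Chars.splitOn t ['\n']).foldl
    (fun r raw => r + max 1 ((wrapTextSimple raw width).length : Int)) 0
  let display_row := pre_rows + cur_row_offset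
  let start_row := min (max 0 (display_row - visible_rows + 1)) (max 0 (total_rows - visible_rows))
  let caret_row_in_box := max 0 (min (visible_rows - 1) (display_row - start_row))
  let col_in_line := PySem.Int.mod (cur_line.length : Int) width
  (start_row, caret_row_in_box, col_in_line)

-- ===== PORT B =====
-- one iteration of B's single pass; state = (total_rows, display_row, col_in_line, offset)
def bStep (caret W : Int) : (Int × Int × Int × Int) → List Char → (Int × Int × Int × Int)
  | (total, display, col, offset), line =>
    let endp := offset + (line.length : Int)
    if offset ≤ caret ∧ caret ≤ endp then
      let pre := PySem.Chars.slice line none (some (caret - offset))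
      (total + max 1 ((wrapTextSimple line W).length : Int),
       total + ((wrapTextSimple pre W).length : Int) - 1,
       PySem.Int.mod ((pre.length : Int)) W,
       endp + 1)
    else
      (total + max 1 ((wrapTextSimple line W).length : Int), display, col, endp + 1)

def caret_view_window_alt (text : String) (caret : Int) (width : Int) (visible_rows : Int) :
    Int × Int × Int :=
  let width := max 1 width
  let visible_rows := max 1 visible_rows
  let t := text.toList                      -- `text or ""` is the identity on strings
  let caret := max 0 (min (t.length : Int) caret)
  -- for line in text.split('\n'): one pass accumulating (total, display, col, offset)
  let st := (PySem.Chars.splitOn t ['\n']).foldl (bStep caret width) (0, 0, 0, 0)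
  let total_rows := st.1
  let display_row := st.2.1
  let col_in_line := st.2.2.1
  let start_row := min (max 0 (display_row - visible_rows + 1)) (max 0 (total_rows - visible_rows))
  let caret_row_in_box := max 0 (min (visible_rows - 1) (display_row - start_row))
  (start_row, caret_row_in_box, col_in_line)

-- ===== PRECONDITION & SPEC =====
def Spec_caret_view_window (text : String) (caret : Int) (width : Int) (visible_rows : Int) (out : Int × Int × Int) : Prop := out = caret_view_window_alt text caret width visible_rows
instance (text : String) (caret : Int) (width : Int) (visible_rows : Int) (out : Int × Int × Int) : Decidable (Spec_caret_view_window text caret width visible_rows out) := by unfold Spec_caret_view_window; infer_instance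

-- ===== CLAIM (what is proved, stated in full; the proofs are below) =====
def Claim_equal_caret_view_window : Prop := ∀ (text : String) (caret : Int) (width : Int) (visible_rows : Int), Dom_caret_view_window text caret width visible_rows → Spec_caret_view_window text caret width visible_rows (caret_view_window text caret width visible_rows)

-- ===== LEMMAS AND PROOFS =====

-- fuel-free model of s.split('\n')
def splitNL : List Char → List (List Char)
  | [] => [[]]
  | c :: rest =>
    if c = '\n' then [] :: splitNL rest
    else
      match splitNL rest with
      | [] => [[c]]
      | x :: xs => (c :: x) :: xs

theorem splitNL_ne_nil (t : List Char) : splitNL t ≠ [] := by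
  cases t with
  | nil => simp [splitNL]
  | cons c rest =>
    simp only [splitNL]
    split
    · simp
    · split <;> simp

theorem splitNL_of_not_mem (u : List Char) (h : '\n' ∉ u) : splitNL u = [u] := by
  induction u with
  | nil => simp [splitNL]
  | cons c rest ih =>
    have hc : c ≠ '\n' := by intro e; exact h (by simp [e])
    have hr : '\n' ∉ rest := fun m => h (by simp [m])
    simp [splitNL, hc, ih hr]

theorem not_mem_of_mem_splitNL (t l : List Char) (hl : l ∈ splitNL t) : '\n' ∉ l := by
  induction t generalizing l with
  | nil => simp [splitNL] at hl; simp [hl]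
  | cons c rest ih =>
    by_cases hc : c = '\n'
    · simp [splitNL, hc] at hl
      rcases hl with h | h
      · simp [h]
      · exact ih l h
    · obtain ⟨x, xs, hx⟩ : ∃ x xs, splitNL rest = x :: xs := by
        cases h : splitNL rest with
        | nil => exact absurd h (splitNL_ne_nil rest)
        | cons a b => exact ⟨a, b, rfl⟩
      simp [splitNL, hc, hx] at hl
      rcases hl with h | h
      · subst h
        have hx' : '\n' ∉ x := ih x (by simp [hx])
        simp [hc, hx']
        exact fun e => hc e.symm
      · exact ih l (by simp [hx, h])

theorem splitNL_append (a b : List Char) (h : '\n' ∉ a) :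
    splitNL (a ++ '\n' :: b) = a :: splitNL b := by
  induction a with
  | nil => simp [splitNL]
  | cons c a ih =>
    have hc : c ≠ '\n' := by intro e; exact h (by simp [e])
    have ha : '\n' ∉ a := fun m => h (by simp [m])
    simp [splitNL, hc, ih ha]

-- splitOn with separator '\n' computes splitNL
theorem splitOn_go_spec (l cur : List Char) (acc : List (List Char)) :
    PySem.Chars.splitOn.go ['\n'] (l.length + 1) l cur acc =
      acc.reverse ++
        (match splitNL l with
         | [] => []
         | x :: xs => (cur.reverse ++ x) :: xs) := by
  induction l generalizing cur acc with
  | nil =>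
    unfold PySem.Chars.splitOn.go
    simp [splitNL]
  | cons c rest ih =>
    by_cases hc : c = '\n'
    · subst hc
      unfold PySem.Chars.splitOn.go
      have hpre : List.isPrefixOf ['\n'] ('\n' :: rest) = true := by
        simp [List.isPrefixOf]
      simp only [List.length_cons, hpre, if_pos]
      rw [show (List.drop ([].length + 1) ('\n' :: rest)) = rest by simp]
      rw [ih]
      obtain ⟨x, xs, hx⟩ : ∃ x xs, splitNL rest = x :: xs := by
        cases h : splitNL rest with
        | nil => exact absurd h (splitNL_ne_nil rest)
        | cons a b => exact ⟨a, b, rfl⟩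
      simp [splitNL, hx]
    · unfold PySem.Chars.splitOn.go
      have hpre : List.isPrefixOf ['\n'] (c :: rest) = false := by
        simp [List.isPrefixOf]
        intro e; exact hc e.symm
      simp only [List.length_cons, hpre]
      rw [if_neg (by simp)]
      rw [ih (c :: cur) acc]
      obtain ⟨x, xs, hx⟩ : ∃ x xs, splitNL rest = x :: xs := by
        cases h : splitNL rest with
        | nil => exact absurd h (splitNL_ne_nil rest)
        | cons a b => exact ⟨a, b, rfl⟩
      simp [splitNL, hc, hx]

theorem splitOn_newline_eq (t : List Char) :
    PySem.Chars.splitOn t ['\n'] = splitNL t := by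
  unfold PySem.Chars.splitOn
  rw [splitOn_go_spec]
  obtain ⟨x, xs, hx⟩ : ∃ x xs, splitNL t = x :: xs := by
    cases h : splitNL t with
    | nil => exact absurd h (splitNL_ne_nil t)
    | cons a b => exact ⟨a, b, rfl⟩
  simp [hx]

-- join, the inverse of splitNL
def joinNL : List (List Char) → List Char
  | [] => []
  | [l] => l
  | l :: ls => l ++ '\n' :: joinNL ls

theorem joinNL_cons₂ (l l2 : List Char) (ls : List (List Char)) :
    joinNL (l :: l2 :: ls) = l ++ '\n' :: joinNL (l2 :: ls) := rfl

theorem joinNL_cons_head (c : Char) (x : List Char) (xs : List (List Char)) :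
    joinNL ((c :: x) :: xs) = c :: joinNL (x :: xs) := by
  cases xs with
  | nil => rfl
  | cons a b => rfl

theorem joinNL_splitNL (t : List Char) : joinNL (splitNL t) = t := by
  induction t with
  | nil => simp [splitNL, joinNL]
  | cons c rest ih =>
    by_cases hc : c = '\n'
    · subst hc
      obtain ⟨x, xs, hx⟩ : ∃ x xs, splitNL rest = x :: xs := by
        cases h : splitNL rest with
        | nil => exact absurd h (splitNL_ne_nil rest)
        | cons a b => exact ⟨a, b, rfl⟩
      rw [hx] at ih
      have hs : splitNL ('\n' :: rest) = [] :: x :: xs := by simp [splitNL, hx]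
      rw [hs, joinNL_cons₂, ih]
      simp
    · obtain ⟨x, xs, hx⟩ : ∃ x xs, splitNL rest = x :: xs := by
        cases h : splitNL rest with
        | nil => exact absurd h (splitNL_ne_nil rest)
        | cons a b => exact ⟨a, b, rfl⟩
      rw [hx] at ih
      simp only [splitNL, hx]
      rw [if_neg hc, joinNL_cons_head, ih]

-- abbreviations for the quantities the pass maintains
def rowSum (W : Int) (ls : List (List Char)) : Int :=
  (ls.map (fun l => max 1 ((wrapTextSimple l W).length : Int))).sum

def lenSum (ls : List (List Char)) : Int :=
  (ls.map (fun l => (l.length : Int) + 1)).sum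

def lastLine (u : List Char) (c : Nat) : List Char :=
  ((splitNL (u.take c)).getLast?).getD []

def dispRel (W : Int) (u : List Char) (c : Nat) : Int :=
  rowSum W (splitNL (u.take c)).dropLast + ((wrapTextSimple (lastLine u c) W).length : Int) - 1

def colRel (W : Int) (u : List Char) (c : Nat) : Int :=
  PySem.Int.mod ((lastLine u c).length : Int) W

theorem lenSum_joinNL (ls : List (List Char)) (h : ls ≠ []) :
    lenSum ls = ((joinNL ls).length : Int) + 1 := by
  induction ls with
  | nil => cases h rfl
  | cons l ls ih =>
    cases ls with
    | nil => simp [lenSum, joinNL]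
    | cons l2 ls2 =>
      rw [joinNL_cons₂]
      have := ih (by simp)
      simp only [lenSum, List.map_cons, List.sum_cons] at *
      rw [this]
      simp
      push_cast
      ring

-- once the offset has passed the caret, the pass only accumulates totals and offset
theorem foldl_noHit (caret W : Int) (ls : List (List Char)) (T D C off : Int)
    (h : caret < off) :
    List.foldl (bStep caret W) (T, D, C, off) ls =
      (T + rowSum W ls, D, C, off + lenSum ls) := by
  induction ls generalizing T off with
  | nil => simp [rowSum, lenSum]
  | cons l ls ih =>
    simp only [List.foldl_cons]
    have hcond : ¬ (off ≤ caret ∧ caret ≤ off + (l.length : Int)) := by omega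
    rw [show bStep caret W (T, D, C, off) l =
        (T + max 1 ((wrapTextSimple l W).length : Int), D, C, off + (l.length : Int) + 1) by
      simp [bStep, hcond]]
    rw [ih _ _ (by omega)]
    simp only [rowSum, lenSum, List.map_cons, List.sum_cons, Prod.mk.injEq]
    refine ⟨by ring, trivial, trivial, by ring⟩

-- a step whose line contains the caret
theorem bStep_hit (W : Int) (l : List Char) (c : Nat) (hc : c ≤ l.length)
    (T D C off : Int) :
    bStep (off + (c : Int)) W (T, D, C, off) l =
      (T + max 1 ((wrapTextSimple l W).length : Int),
       T + ((wrapTextSimple (l.take c) W).length : Int) - 1,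
       PySem.Int.mod ((l.take c).length : Int) W,
       off + (l.length : Int) + 1) := by
  have hcond : off ≤ off + (c : Int) ∧ off + (c : Int) ≤ off + (l.length : Int) := by
    constructor <;> omega
  have hsl : PySem.Chars.slice l none (some (off + (c : Int) - off)) = l.take c := by
    rw [show off + (c : Int) - off = (c : Int) by ring]
    rw [PySem.Chars.slice_eq_listSlice, PySem.List.slice_to l (by omega : (0:Int) ≤ (c:Int))]
    simp
  simp only [bStep]
  rw [if_pos hcond, hsl]

-- a step whose line lies entirely before the caret
theorem bStep_miss (W : Int) (l : List Char) (c : Nat) (hc : l.length < c)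
    (T D C off : Int) :
    bStep (off + (c : Int)) W (T, D, C, off) l =
      (T + max 1 ((wrapTextSimple l W).length : Int), D, C, off + (l.length : Int) + 1) := by
  have hcond : ¬ (off ≤ off + (c : Int) ∧ off + (c : Int) ≤ off + (l.length : Int)) := by
    omega
  simp only [bStep]
  rw [if_neg hcond]

-- the heart of the equivalence: B's pass computes A's three quantities
theorem foldl_main (W : Int) (hW : 1 ≤ W) (ls : List (List Char)) :
    ls ≠ [] → (∀ l ∈ ls, '\n' ∉ l) →
    ∀ (c : Nat), c ≤ (joinNL ls).length →
    ∀ (T D0 C0 off : Int),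
    List.foldl (bStep (off + (c : Int)) W) (T, D0, C0, off) ls =
      (T + rowSum W ls,
       T + dispRel W (joinNL ls) c,
       colRel W (joinNL ls) c,
       off + ((joinNL ls).length : Int) + 1) := by
  induction ls with
  | nil => intro h; cases h rfl
  | cons l ls ih =>
    intro _ hnf c hc T D0 C0 off
    have hnl : '\n' ∉ l := hnf l (by simp)
    cases ls with
    | nil =>
      -- single line: the caret is in it
      simp only [joinNL] at hc ⊢
      simp only [List.foldl_cons, List.foldl_nil]
      rw [bStep_hit W l c hc]
      have hsp : splitNL (l.take c) = [l.take c] :=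
        splitNL_of_not_mem _ (fun m => hnl (List.take_subset c l m))
      simp only [Prod.mk.injEq]
      refine ⟨?_, ?_, ?_, ?_⟩ <;>
        · try simp [rowSum, dispRel, colRel, lastLine, hsp]
          try push_cast
          try ring_nf
          try omega
    | cons l2 ls2 =>
      rw [joinNL_cons₂] at hc ⊢
      by_cases hcl : c ≤ l.length
      · -- the caret is in the first line; the rest of the pass is a pure sum
        rw [List.foldl_cons, bStep_hit W l c hcl]
        rw [foldl_noHit (off + (c : Int)) W (l2 :: ls2) _ _ _
          (off + (l.length : Int) + 1) (by push_cast; omega)]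
        have htake : (l ++ '\n' :: joinNL (l2 :: ls2)).take c = l.take c := by
          rw [List.take_append_of_le_length hcl]
        have hsp : splitNL (l.take c) = [l.take c] :=
          splitNL_of_not_mem _ (fun m => hnl (List.take_subset c l m))
        rw [lenSum_joinNL _ (by simp)]
        simp only [Prod.mk.injEq]
        refine ⟨?_, ?_, ?_, ?_⟩ <;>
          · try simp [rowSum, lenSum, dispRel, colRel, lastLine, htake, hsp]
            try push_cast
            try ring_nf
            try omega
      · -- the caret is past the first line and its newline: recurse
        have hc2 : c - l.length - 1 ≤ (joinNL (l2 :: ls2)).length := by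
          simp only [List.length_append, List.length_cons] at hc
          omega
        have hcast : off + (c : Int) =
            (off + (l.length : Int) + 1) + ((c - l.length - 1 : Nat) : Int) := by
          push_cast [Nat.cast_sub (by omega : 1 ≤ c - l.length),
            Nat.cast_sub (by omega : l.length ≤ c)]
          ring
        rw [List.foldl_cons]
        rw [show bStep (off + (c : Int)) W (T, D0, C0, off) l =
            (T + max 1 ((wrapTextSimple l W).length : Int), D0, C0,
             off + (l.length : Int) + 1) from bStep_miss W l c (by omega) T D0 C0 off]
        rw [hcast, ih (by simp) (fun x hx => hnf x (by simp [hx])) _ hc2]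
        have htake : (l ++ '\n' :: joinNL (l2 :: ls2)).take c =
            l ++ '\n' :: (joinNL (l2 :: ls2)).take (c - l.length - 1) := by
          rw [show c = l.length + (1 + (c - l.length - 1)) by omega]
          rw [List.take_append]
          simp [List.take_cons]
        have hsp : splitNL ((l ++ '\n' :: joinNL (l2 :: ls2)).take c) =
            l :: splitNL ((joinNL (l2 :: ls2)).take (c - l.length - 1)) := by
          rw [htake, splitNL_append _ _ hnl]
        obtain ⟨x, xs, hx⟩ : ∃ x xs,
            splitNL ((joinNL (l2 :: ls2)).take (c - l.length - 1)) = x :: xs := by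
          cases h : splitNL ((joinNL (l2 :: ls2)).take (c - l.length - 1)) with
          | nil => exact absurd h (splitNL_ne_nil _)
          | cons a b => exact ⟨a, b, rfl⟩
        simp only [dispRel, colRel, lastLine, hsp, hx, rowSum, List.map_cons,
          List.sum_cons, List.length_append, List.length_cons, Prod.mk.injEq]
        rw [show (l :: x :: xs).dropLast = l :: (x :: xs).dropLast from List.dropLast_cons₂ .., 
            show (l :: x :: xs).getLast? = (x :: xs).getLast? from List.getLast?_cons_cons ..]
        simp only [List.map_cons, List.sum_cons]
        refine ⟨by ring, by ring, by trivial, by push_cast; ring⟩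

theorem wrap_nil (w : Int) (hw : 0 < w) : wrapTextSimple [] w = [[]] := by
  unfold wrapTextSimple
  rw [if_neg (by omega : ¬ w ≤ 0)]
  have h1 : PySem.Chars.splitlines [] = [] := by decide
  rw [h1, if_pos rfl, List.foldl_cons, List.foldl_nil]
  rfl

-- A's cur_line (with its dead pre/else guard) is exactly lastLine
theorem curline_eq (t : List Char) (c : Nat) (hc : c ≤ t.length) :
    (if t.take c = [] then ([] : List Char)
     else (PySem.List.pyGet? (PySem.Chars.splitOn (t.take c) ['\n']) (-1)).getD []) =
    lastLine t c := by
  rw [splitOn_newline_eq, PySem.List.pyGet?_neg_one]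
  by_cases h : t.take c = []
  · rw [if_pos h]
    unfold lastLine
    rw [h]
    simp [splitNL]
  · rw [if_neg h]
    rfl

-- A's guarded cur_row_offset is wlen(cur_line) - 1 unconditionally (wrap("") = [""])
theorem curoff_eq (W : Int) (hW : 1 ≤ W) (p : List Char) :
    (if p = [] then (0 : Int) else ((wrapTextSimple p W).length : Int) - 1) =
      ((wrapTextSimple p W).length : Int) - 1 := by
  by_cases h : p = []
  · rw [if_pos h, h, wrap_nil W (by omega)]
    simp
  · rw [if_neg h]

-- ===== VERDICT (by name: the statement is the Claim_ definition above) =====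
theorem caret_view_window_spec : Claim_equal_caret_view_window := by
  intro text caret width visible_rows _
  unfold Spec_caret_view_window caret_view_window caret_view_window_alt
  simp only []
  set W := max 1 width with hW'
  have hW : 1 ≤ W := le_max_left _ _
  set V := max 1 visible_rows with hV'
  set t := text.toList with ht'
  set cI := max 0 (min ((t.length : Int)) caret) with hcI
  have hc0 : 0 ≤ cI := le_max_left _ _
  have hcle : cI ≤ (t.length : Int) := by
    have h1 : min ((t.length : Int)) caret ≤ (t.length : Int) := min_le_left _ _
    omega
  set c : Nat := cI.toNat with hcN
  have hcl : c ≤ t.length := by omega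
  have hB := foldl_main W hW (splitNL t) (splitNL_ne_nil t)
    (fun l hl => not_mem_of_mem_splitNL t l hl) c
    (by rw [joinNL_splitNL]; exact hcl) 0 0 0 0
  rw [joinNL_splitNL] at hB
  have hcast : cI = 0 + (c : Int) := by omega
  rw [hcast]
  have hpre : PySem.Chars.slice t none (some (0 + (c : Int))) = t.take c := by
    rw [PySem.Chars.slice_eq_listSlice, PySem.List.slice_to t (by omega : (0:Int) ≤ 0 + (c:Int))]
    simp
  rw [hpre, curline_eq t c hcl, curoff_eq W hW]
  simp only [splitOn_newline_eq]
  rw [hB]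
  rw [PySem.List.foldl_add, PySem.List.foldl_add]
  simp only [dispRel, colRel, rowSum, Prod.mk.injEq]
  set S := (List.map (fun raw => max 1 ((wrapTextSimple raw W).length : Int))
    (splitNL (List.take c t)).dropLast).sum with hS
  set wl := ((wrapTextSimple (lastLine t c) W).length : Int) with hwl
  set Tot := (List.map (fun raw => max 1 ((wrapTextSimple raw W).length : Int))
    (splitNL t)).sum with hTot
  refine ⟨?_, ?_, ?_⟩ <;> first | trivial | ring_nf
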